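-- pv_equiv track=rewrite | github.com/antoniopaolillo/antoniopaolillo.github.io | trybe-exercises/block36/36.1/exercise1.py | asterisc_print
-- ===== SOURCE A (Python) =====
-- def asterisc_print(num):
--     string = ''
--     num2 = num
--     num3 = num
--     while num2 > 0:
--         while num3 > 0:
--             string += '*'
--             num3 -= 1
--         string += "\n"
--         num3 = num
--         num2 -= 1
--     return string
-- ===== SOURCE B (Python) =====
-- def asterisc_print(num):
--     return ('*' * num + '\n') * num
-- ===== Notes on version B (the rewrite author's own statement) =====
-- stated objective: simpler
-- what changed: Replaced the two nested while-loops with per-character string concatenation by the single closed-form expression ('*'*num + '\n') * num.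
import Mathlib
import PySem

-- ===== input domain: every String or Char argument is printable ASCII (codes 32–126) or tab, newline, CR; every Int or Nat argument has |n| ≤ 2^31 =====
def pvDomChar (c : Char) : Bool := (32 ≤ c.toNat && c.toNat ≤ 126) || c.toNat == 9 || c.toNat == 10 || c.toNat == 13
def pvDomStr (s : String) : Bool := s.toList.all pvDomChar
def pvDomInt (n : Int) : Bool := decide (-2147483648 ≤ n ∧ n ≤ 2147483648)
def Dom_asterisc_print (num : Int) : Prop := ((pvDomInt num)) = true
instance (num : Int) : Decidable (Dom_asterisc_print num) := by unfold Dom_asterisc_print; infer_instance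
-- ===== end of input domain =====

-- B replaces A's two nested while-loops and per-character concatenation with the
-- closed-form expression ('*'*num + '\n') * num (objective: simpler).

-- ===== PORT A =====
-- inner while loop: while num3 > 0: string += '*'; num3 -= 1   (string as List Char)
def pvInnerA (s : List Char) (num3 : Int) : List Char :=
  if 0 < num3 then pvInnerA (s ++ ['*']) (num3 - 1) else s
termination_by num3.toNat
decreasing_by omega

-- outer while loop: while num2 > 0: <inner>; string += '\n'; num3 = num; num2 -= 1
def pvOuterA (s : List Char) (num2 num3 num : Int) : List Char :=
  if 0 < num2 then pvOuterA (pvInnerA s num3 ++ ['\n']) (num2 - 1) num num else s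
termination_by num2.toNat
decreasing_by omega

def asterisc_print (num : Int) : String :=
  String.ofList (pvOuterA [] num num num)

-- ===== PORT B =====
def asterisc_print_alt (num : Int) : String :=
  String.ofList (PySem.List.pyRepeat (PySem.List.pyRepeat ['*'] num ++ ['\n']) num)

-- ===== PRECONDITION & SPEC =====
def Spec_asterisc_print (num : Int) (out : String) : Prop := out = asterisc_print_alt num
instance (num : Int) (out : String) : Decidable (Spec_asterisc_print num out) := by unfold Spec_asterisc_print; infer_instance

-- ===== CLAIM (what is proved, stated in full; the proofs are below) =====
def Claim_equal_asterisc_print : Prop := ∀ (num : Int), Dom_asterisc_print num → Spec_asterisc_print num (asterisc_print num)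

-- ===== LEMMAS AND PROOFS =====
theorem pvInnerA_eq_aux (k : Nat) : ∀ (s : List Char) (n : Int), n.toNat = k →
    pvInnerA s n = s ++ List.replicate k '*' := by
  induction k with
  | zero =>
    intro s n h
    rw [pvInnerA]
    have : ¬ 0 < n := by omega
    simp [this]
  | succ k ih =>
    intro s n h
    rw [pvInnerA]
    have hpos : 0 < n := by omega
    rw [if_pos hpos, ih (s ++ ['*']) (n - 1) (by omega), List.replicate_succ]
    simp

theorem pvInnerA_eq (s : List Char) (n : Int) :
    pvInnerA s n = s ++ List.replicate n.toNat '*' :=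
  pvInnerA_eq_aux n.toNat s n rfl

theorem pvOuterA_eq_aux (num : Int) (k : Nat) : ∀ (s : List Char) (n2 : Int), n2.toNat = k →
    pvOuterA s n2 num num =
      s ++ (List.replicate k (List.replicate num.toNat '*' ++ ['\n'])).flatten := by
  induction k with
  | zero =>
    intro s n2 h
    rw [pvOuterA]
    have : ¬ 0 < n2 := by omega
    simp [this]
  | succ k ih =>
    intro s n2 h
    rw [pvOuterA]
    have hpos : 0 < n2 := by omega
    rw [if_pos hpos, ih _ (n2 - 1) (by omega), pvInnerA_eq, List.replicate_succ,
      List.flatten_cons]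
    simp

-- ===== VERDICT (by name: the statement is the Claim_ definition above) =====
theorem asterisc_print_spec : Claim_equal_asterisc_print := by
  intro num _
  unfold Spec_asterisc_print asterisc_print asterisc_print_alt
  rw [pvOuterA_eq_aux num num.toNat [] num rfl]
  simp [PySem.List.pyRepeat]
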